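-- pv_equiv track=rewrite | github.com/xerk-dot/helix | backend_flask/services/openai_service.py | _parse_workflow_steps
-- ===== SOURCE A (Python) =====
-- from typing import Dict, Any, List
--
-- def _parse_workflow_steps(content: str) -> List[Dict[str, Any]]:
--     """Parse the AI response into structured workflow steps"""
--     # This is a simplified parser - in production, you'd want more robust parsing
--     lines = content.split("\n")
--     steps = []
--     current_step = {}
--
--     for line in lines:
--         line = line.strip()
--         if not line:
--             continue
--
--         if line.startswith("- ") or line.startswith("* "):
--             if current_step:
--                 steps.append(current_step)
--             current_step = {"title": line[2:]}
--         elif ":" in line: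
--             key, value = line.split(":", 1)
--             key = key.strip().lower().replace(" ", "_")
--             current_step[key] = value.strip()
--
--     if current_step:
--         steps.append(current_step)
--
--     return steps
-- ===== SOURCE B (Python) =====
-- def _parse_workflow_steps(content):
--     """Two-pass parser: partition stripped non-blank lines into bullet-headed
--     groups, then map each group to a step dict."""
--     def is_bullet(l):
--         return l.startswith("- ") or l.startswith("* ")
--
--     lines = [l for l in (raw.strip() for raw in content.split("\n")) if l]
--
--     groups = []
--     cur = []
--     for l in lines:
--         if is_bullet(l):
--             groups.append(cur)
--             cur = [l]
--         else:
--             cur.append(l)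
--     groups.append(cur)
--
--     def to_dict(g):
--         d = {}
--         rest = g
--         if g and is_bullet(g[0]):
--             d["title"] = g[0][2:]
--             rest = g[1:]
--         for l in rest:
--             if ":" in l:
--                 key, value = l.split(":", 1)
--                 d[key.strip().lower().replace(" ", "_")] = value.strip()
--         return d
--
--     result = []
--     for g in groups:
--         d = to_dict(g)
--         if d:
--             result.append(d)
--     return result
-- ===== Notes on version B (the rewrite author's own statement) =====
-- stated objective: alternative
-- what changed: A's single stateful loop (one dict accumulator flushed on bullets) is replaced by a two-pass decomposition: partition stripped non-blank lines into bullet-headed groups, then map each group independently to a step dict, keeping the non-empty ones.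
import Mathlib
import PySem

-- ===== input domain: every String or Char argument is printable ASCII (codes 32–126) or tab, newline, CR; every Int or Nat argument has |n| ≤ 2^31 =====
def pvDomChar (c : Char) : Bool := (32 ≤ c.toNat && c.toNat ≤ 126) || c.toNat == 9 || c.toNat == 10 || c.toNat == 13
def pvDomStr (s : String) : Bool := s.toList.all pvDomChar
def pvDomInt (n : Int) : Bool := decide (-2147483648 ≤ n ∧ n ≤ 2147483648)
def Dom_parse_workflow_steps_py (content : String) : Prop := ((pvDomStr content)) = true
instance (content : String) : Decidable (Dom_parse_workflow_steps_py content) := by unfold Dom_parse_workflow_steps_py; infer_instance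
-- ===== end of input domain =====

-- B replaces A's single stateful loop by a two-pass decomposition (partition lines into
-- bullet-headed groups, then map each group to a step dict); objective: alternative, same cost.


-- ===== PORT A =====
-- shared per-line primitives (both Pythons contain these same sub-expressions)
def pvBullet (line : String) : Bool :=
  PySem.Str.startswith line "- " || PySem.Str.startswith line "* "

-- the "elif ':' in line: key, value = line.split(':', 1); current[key…] = value…" body
def pvKVStep (d : PySem.Dict String String) (line : String) : PySem.Dict String String :=
  if PySem.Str.isIn ":" line then
    match PySem.Str.splitMax? line ":" 1 with
    | some (key :: value :: _) =>
        PySem.Dict.insert d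
          (PySem.Str.replace (PySem.Str.lower (PySem.Str.strip key)) " " "_")
          (PySem.Str.strip value)
    | _ => d            -- unreachable: ':' in line guarantees a 2-part split
  else d

-- A's loop body on an already-stripped, non-blank line
def pvStepC (st : List (List (String × String)) × PySem.Dict String String) (line : String) :
    List (List (String × String)) × PySem.Dict String String :=
  if pvBullet line then
    ((if st.2.items ≠ [] then st.1 ++ [st.2.items] else st.1),
     PySem.Dict.insert PySem.Dict.empty "title" (PySem.Str.slice line (some 2) none))
  else (st.1, pvKVStep st.2 line)

-- A's loop body: strip, skip blanks, then the branch above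
def pvStepA (st : List (List (String × String)) × PySem.Dict String String) (raw : String) :
    List (List (String × String)) × PySem.Dict String String :=
  let line := PySem.Str.strip raw
  if line = "" then st else pvStepC st line

def parse_workflow_steps_py (content : String) : List (List (String × String)) :=
  let st := ((PySem.Str.split? content "\n").getD []).foldl pvStepA ([], PySem.Dict.empty)
  if st.2.items ≠ [] then st.1 ++ [st.2.items] else st.1

-- ===== PORT B =====
-- pass 1 body: start a new group at each bullet line
def pvGroupStep (st : List (List String) × List String) (l : String) :
    List (List String) × List String :=
  if pvBullet l then (st.1 ++ [st.2], [l]) else (st.1, st.2 ++ [l])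

-- pass 2: one group -> one step dict
def pvGroupDict (g : List String) : PySem.Dict String String :=
  match g with
  | [] => PySem.Dict.empty
  | h :: t =>
    if pvBullet h then
      t.foldl pvKVStep (PySem.Dict.insert PySem.Dict.empty "title" (PySem.Str.slice h (some 2) none))
    else (h :: t).foldl pvKVStep PySem.Dict.empty

def parse_workflow_steps_py_alt (content : String) : List (List (String × String)) :=
  let lines := (((PySem.Str.split? content "\n").getD []).map PySem.Str.strip).filter
      (fun l => l ≠ "")
  let st := lines.foldl pvGroupStep ([], [])
  (st.1 ++ [st.2]).foldl
    (fun r g => let d := pvGroupDict g; if d.items ≠ [] then r ++ [d.items] else r) []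

-- ===== PRECONDITION & SPEC =====
def Spec_parse_workflow_steps_py (content : String) (out : List (List (String × String))) : Prop := out = parse_workflow_steps_py_alt content
instance (content : String) (out : List (List (String × String))) : Decidable (Spec_parse_workflow_steps_py content out) := by unfold Spec_parse_workflow_steps_py; infer_instance

-- ===== CLAIM (what is proved, stated in full; the proofs are below) =====
def Claim_equal_parse_workflow_steps_py : Prop := ∀ (content : String), Dom_parse_workflow_steps_py content → Spec_parse_workflow_steps_py content (parse_workflow_steps_py content)

-- ===== LEMMAS AND PROOFS =====
-- what B emits for one group
def pvFlush (g : List String) : List (List (String × String)) :=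
  if (pvGroupDict g).items ≠ [] then [(pvGroupDict g).items] else []

lemma pvOut_fold (gs : List (List String)) (r : List (List (String × String))) :
    gs.foldl (fun r g => let d := pvGroupDict g; if d.items ≠ [] then r ++ [d.items] else r) r
      = r ++ gs.flatMap pvFlush := by
  induction gs generalizing r with
  | nil => simp
  | cons g gs ih =>
      simp only [List.foldl_cons, List.flatMap_cons, ih, pvFlush]
      split <;> simp

-- A's raw fold = the clean-line fold over stripped, non-blank lines
lemma foldA_clean (ls : List String)
    (st : List (List (String × String)) × PySem.Dict String String) :
    ls.foldl pvStepA st = ((ls.map PySem.Str.strip).filter (fun l => l ≠ "")).foldl pvStepC st := by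
  induction ls generalizing st with
  | nil => rfl
  | cons l ls ih =>
      simp only [List.foldl_cons, List.map_cons, List.filter_cons, pvStepA]
      by_cases h : PySem.Str.strip l = "" <;> simp [h, ih]

lemma pvGroupDict_append (g : List String) (l : String) (hl : pvBullet l = false) :
    pvGroupDict (g ++ [l]) = pvKVStep (pvGroupDict g) l := by
  cases g with
  | nil => simp [pvGroupDict, hl]
  | cons h t =>
      simp only [List.cons_append, pvGroupDict]
      split <;> simp [List.foldl_append]

-- the loop invariant: finishing A's fold from a state mirroring B's grouping state
-- yields B's per-group output
lemma pvMain (ls : List String) (gs : List (List String)) (cg : List String) :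
    (let st := ls.foldl pvStepC (gs.flatMap pvFlush, pvGroupDict cg);
     if st.2.items ≠ [] then st.1 ++ [st.2.items] else st.1)
      = ((ls.foldl pvGroupStep (gs, cg)).1 ++ [(ls.foldl pvGroupStep (gs, cg)).2]).flatMap pvFlush := by
  induction ls generalizing gs cg with
  | nil =>
      simp only [List.foldl_nil, List.flatMap_append, List.flatMap_cons, List.flatMap_nil,
        List.append_nil, pvFlush]
      split <;> simp
  | cons l ls ih =>
      simp only [List.foldl_cons]
      by_cases hb : pvBullet l = true
      · have hflush : (if (pvGroupDict cg).items ≠ [] then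
              gs.flatMap pvFlush ++ [(pvGroupDict cg).items] else gs.flatMap pvFlush)
            = (gs ++ [cg]).flatMap pvFlush := by
          simp only [List.flatMap_append, List.flatMap_cons, List.flatMap_nil,
            List.append_nil, pvFlush]
          split <;> simp
        have h1 : pvStepC (gs.flatMap pvFlush, pvGroupDict cg) l
            = ((gs ++ [cg]).flatMap pvFlush, pvGroupDict [l]) := by
          simp only [pvStepC, hb, if_true, Prod.mk.injEq]
          exact ⟨hflush, by simp [pvGroupDict, hb]⟩
        rw [h1, ih (gs ++ [cg]) [l]]
        simp [pvGroupStep, hb]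
      · have hb' : pvBullet l = false := by simpa using hb
        have h1 : pvStepC (gs.flatMap pvFlush, pvGroupDict cg) l
            = (gs.flatMap pvFlush, pvGroupDict (cg ++ [l])) := by
          simp [pvStepC, hb', pvGroupDict_append cg l hb']
        rw [h1, ih gs (cg ++ [l])]
        simp [pvGroupStep, hb']

-- ===== VERDICT (by name: the statement is the Claim_ definition above) =====
theorem parse_workflow_steps_py_spec : Claim_equal_parse_workflow_steps_py := by
  intro content _
  unfold Spec_parse_workflow_steps_py parse_workflow_steps_py parse_workflow_steps_py_alt
  rw [foldA_clean, pvOut_fold]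
  have := pvMain ((((PySem.Str.split? content "\n").getD []).map PySem.Str.strip).filter
      (fun l => l ≠ "")) [] []
  simpa [pvGroupDict] using this
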